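-- pv_equiv track=rewrite | github.com/ModPunchtree/URCL-Optimiser-V2 | URCLOptimiserV2/urcl_optimiser_v2.py | PSHPOP
-- ===== SOURCE A (Python) =====
-- def removeEmptyLines(code: list):
--
--     success = False
--
--     code2 = []
--     for line in code:
--         if line and (line != [""]) and (line != [" "]):
--             code2.append(line)
--         else:
--             success = True
--
--     return code2, success
--
-- def PSHPOP(code: list):
--
--     success = False
--
--     for index, line in enumerate(code[: -1]):
--         if line[0] == "PSH":
--             if code[index + 1][0] == "POP":
--                 code[index] = [""]
--                 code[index + 1] = ["MOV", code[index + 1][1], line[1]]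
--                 success = True
--
--     for index, line in enumerate(code[: -1]):
--         if line[0] == "HPSH":
--             if code[index + 1][0] == "HPOP":
--                 code[index] = [""]
--                 code[index + 1] = ["MOV", code[index + 1][1], line[1]]
--                 success = True
--
--     for index, line in enumerate(code[: -1]):
--         if line[0] == "HSAV":
--             if code[index + 1][0] == "HRSR":
--                 code[index] = [""]
--                 code[index + 1] = ["MOV", code[index + 1][1], line[1]]
--                 success = True
--
--     code, success2 = removeEmptyLines(code)
--
--     return code, success
-- ===== SOURCE B (Python) =====
-- def PSHPOP(code: list):
--     pairs = {"PSH": "POP", "HPSH": "HPOP", "HSAV": "HRSR"}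
--     out = []
--     success = False
--     i, n = 0, len(code)
--     while i < n:
--         line = code[i]
--         if (i + 1 < n and line and line[0] in pairs
--                 and code[i + 1] and code[i + 1][0] == pairs[line[0]]):
--             out.append(["MOV", code[i + 1][1], line[1]])
--             success = True
--             i += 2
--         else:
--             if line and line != [""] and line != [" "]:
--                 out.append(line)
--             i += 1
--     return out, success
-- ===== Notes on version B (the rewrite author's own statement) =====
-- stated objective: simpler
-- what changed: A's three separate in-place mutating passes (one per push/pop opcode pair) followed by a fourth line-removal pass are replaced by a single streaming pass that uses a push-to-pop dispatch dict, emits the MOV directly, skips the consumed pair, and filters empty lines on the fly without mutating the input.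
import Mathlib
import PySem

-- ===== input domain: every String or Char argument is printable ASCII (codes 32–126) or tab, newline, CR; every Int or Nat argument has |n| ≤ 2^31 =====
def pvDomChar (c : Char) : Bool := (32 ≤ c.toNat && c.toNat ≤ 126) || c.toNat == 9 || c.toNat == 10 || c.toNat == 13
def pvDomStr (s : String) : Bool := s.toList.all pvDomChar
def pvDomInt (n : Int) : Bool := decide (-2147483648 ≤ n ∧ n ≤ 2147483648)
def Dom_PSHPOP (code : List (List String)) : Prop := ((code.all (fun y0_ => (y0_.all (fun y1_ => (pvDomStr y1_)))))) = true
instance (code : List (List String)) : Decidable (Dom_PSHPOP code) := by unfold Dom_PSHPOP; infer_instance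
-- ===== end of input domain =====

-- B replaces A's three in-place-mutating passes plus a final filter pass by one streaming pass
-- with a push→pop dispatch dict (objective: simpler). A mutates its `code` argument in place;
-- the equivalence proved here is about the RETURN value only (B does not mutate).

-- ===== PORT A =====
-- one iteration of 'for index, line in enumerate(code[:-1])' of one of A's three loops;
-- the '=> st' fallbacks of the 'none' cases are where Python raises IndexError (outside Pre_)
def pvStepA (psh pop : String) (st : List (List String) × Bool) (p : Int × List String) :
    List (List String) × Bool :=
  match PySem.List.pyGet? p.2 0 with
  | none => st
  | some h =>
    if h = psh then
      match PySem.List.pyGet? st.1 (p.1 + 1) with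
      | none => st
      | some nxt =>
        match PySem.List.pyGet? nxt 0 with
        | none => st
        | some h2 =>
          if h2 = pop then
            match PySem.List.pyGet? nxt 1, PySem.List.pyGet? p.2 1 with
            | some b1, some a1 =>
                (PySem.List.pySetD (PySem.List.pySetD st.1 p.1 [""]) (p.1 + 1) ["MOV", b1, a1], true)
            | _, _ => st
          else st
    else st

-- 'for index, line in enumerate(code[:-1]): …' (one of the three identical loops of A)
def pvLoopA (psh pop : String) (code : List (List String)) (s : Bool) :
    List (List String) × Bool :=
  (PySem.List.enumerate (PySem.List.slice code none (some (-1))) 0).foldl (pvStepA psh pop) (code, s)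

def removeEmptyLines (code : List (List String)) : List (List String) × Bool :=
  code.foldl
    (fun (st : List (List String) × Bool) line =>
      if line ≠ [] ∧ line ≠ [""] ∧ line ≠ [" "] then (st.1 ++ [line], st.2) else (st.1, true))
    ([], false)

def PSHPOP (code : List (List String)) : List (List String) × Bool :=
  let r1 := pvLoopA "PSH" "POP" code false
  let r2 := pvLoopA "HPSH" "HPOP" r1.1 r1.2
  let r3 := pvLoopA "HSAV" "HRSR" r2.1 r2.2
  let r4 := removeEmptyLines r3.1
  (r4.1, r3.2)

-- ===== PORT B =====
def pvPairs : PySem.Dict String String :=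
  PySem.Dict.ofList [("PSH", "POP"), ("HPSH", "HPOP"), ("HSAV", "HRSR")]

def pvKeep (l : List String) : Bool := decide (l ≠ []) && decide (l ≠ [""]) && decide (l ≠ [" "])

-- guard of B's single pass; the two '2 ≤ length' conjuncts are where Python B would raise
-- IndexError on the operand accesses of a matched pair (such inputs are outside Pre_)
def pvMatchB (a b : List String) : Bool :=
  !a.isEmpty &&
    (match PySem.Dict.get? pvPairs (a.headD "") with
     | some p => !b.isEmpty && (b.headD "" == p) && decide (2 ≤ a.length) && decide (2 ≤ b.length)
     | none => false)

-- B's while loop, state (out, success): a matched pair emits one MOV and consumes two lines,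
-- otherwise one line is kept or filtered and consumed
def pvGoB (acc : List (List String)) (succ : Bool) :
    List (List String) → List (List String) × Bool
  | [] => (acc, succ)
  | [a] => (if pvKeep a then acc ++ [a] else acc, succ)
  | a :: b :: rest =>
    if pvMatchB a b then pvGoB (acc ++ [["MOV", b.getD 1 "", a.getD 1 ""]]) true rest
    else pvGoB (if pvKeep a then acc ++ [a] else acc) succ (b :: rest)

def PSHPOP_alt (code : List (List String)) : List (List String) × Bool :=
  pvGoB [] false code

-- ===== PRECONDITION & SPEC =====
def pvIsPush (s : String) : Option String :=
  if s = "PSH" then some "POP"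
  else if s = "HPSH" then some "HPOP"
  else if s = "HSAV" then some "HRSR" else none

-- Pre_ excludes exactly the inputs on which A raises IndexError: an empty line among
-- code[:-1], a push line whose successor line is empty, or a matched push/pop pair in
-- which either line lacks the operand at index 1.
def Pre_PSHPOP (code : List (List String)) : Prop :=
  ∀ i ∈ List.range (code.length - 1),
    code.getD i [] ≠ [] ∧
    ((pvIsPush ((code.getD i []).headD "")).isSome = true →
      code.getD (i + 1) [] ≠ [] ∧
      ((code.getD (i + 1) []).headD "" = (pvIsPush ((code.getD i []).headD "")).getD "" →
        2 ≤ (code.getD i []).length ∧ 2 ≤ (code.getD (i + 1) []).length))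
instance (code : List (List String)) : Decidable (Pre_PSHPOP code) := by
  unfold Pre_PSHPOP; infer_instance

def pvWitness_PSHPOP : List (List String) := [["PSH", "R1"], ["POP", "R2"], ["ADD", "R1"]]

def Spec_PSHPOP (code : List (List String)) (out : List (List String) × Bool) : Prop := out = PSHPOP_alt code
instance (code : List (List String)) (out : List (List String) × Bool) : Decidable (Spec_PSHPOP code out) := by unfold Spec_PSHPOP; infer_instance

-- ===== CLAIM (what is proved, stated in full; the proofs are below) =====
def Claim_equal_PSHPOP : Prop := ∀ (code : List (List String)), Dom_PSHPOP code → Pre_PSHPOP code → Spec_PSHPOP code (PSHPOP code)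

-- ===== LEMMAS AND PROOFS =====

theorem pvSetShift {α : Type} (c : List α) (a v : α) (i : Int) (hi : 0 ≤ i) :
    PySem.List.pySetD (a :: c) (i + 1) v = a :: PySem.List.pySetD c i v := by
  rw [PySem.List.pySetD_of_nonneg _ _ (by omega), PySem.List.pySetD_of_nonneg _ _ hi]
  rw [show (i + 1).toNat = i.toNat + 1 by omega, List.set_cons_succ]

theorem pvGetShift {α : Type} (c : List α) (a : α) (i : Int) (hi : 0 ≤ i) :
    PySem.List.pyGet? (a :: c) (i + 1) = PySem.List.pyGet? c i := by
  rw [PySem.List.pyGet?_of_nonneg _ (by omega), PySem.List.pyGet?_of_nonneg _ hi]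
  rw [show (i + 1).toNat = i.toNat + 1 by omega, List.getElem?_cons_succ]

-- the match condition of one of A's loops on an adjacent pair (a, b), exactly pvStepA's guard
def pvM (psh pop : String) (a b : List String) : Bool :=
  match PySem.List.pyGet? a 0 with
  | none => false
  | some h =>
    if h = psh then
      match PySem.List.pyGet? b 0 with
      | none => false
      | some h2 =>
        if h2 = pop then (PySem.List.pyGet? b 1).isSome && (PySem.List.pyGet? a 1).isSome
        else false
    else false

-- pure structural description of one of A's loops
def pvT (psh pop : String) : List (List String) → List (List String) × Bool
  | a :: b :: rest =>
    if pvM psh pop a b then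
      ([""] :: ["MOV", b.getD 1 "", a.getD 1 ""] :: (pvT psh pop rest).1, true)
    else (a :: (pvT psh pop (b :: rest)).1, (pvT psh pop (b :: rest)).2)
  | l => (l, false)

-- pure structural description of A's three loops fused into one pass
def pvTC : List (List String) → List (List String) × Bool
  | a :: b :: rest =>
    if pvM "PSH" "POP" a b || pvM "HPSH" "HPOP" a b || pvM "HSAV" "HRSR" a b then
      ([""] :: ["MOV", b.getD 1 "", a.getD 1 ""] :: (pvTC rest).1, true)
    else (a :: (pvTC (b :: rest)).1, (pvTC (b :: rest)).2)
  | l => (l, false)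

theorem pvStepA_shift (psh pop : String) (a : List String) (c : List (List String)) (b0 : Bool)
    (s : Nat) (x : List String) :
    pvStepA psh pop (a :: c, b0) ((s : Int) + 1, x) =
      ((fun r => (a :: r.1, r.2)) (pvStepA psh pop (c, b0) ((s : Int), x)) :
        List (List String) × Bool) := by
  have g1 := pvGetShift c a ((s : Int) + 1) (by omega)
  cases h0 : PySem.List.pyGet? x 0 with
  | none => simp [pvStepA, h0]
  | some h =>
    by_cases hp : h = psh
    · subst hp
      cases h1 : PySem.List.pyGet? c ((s : Int) + 1) with
      | none => simp [pvStepA, h0, g1, h1]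
      | some nxt =>
        by_cases h2c : ∃ h2, PySem.List.pyGet? nxt 0 = some h2 ∧ h2 = pop
        · obtain ⟨h2, hh2, rfl⟩ := h2c
          cases h3 : PySem.List.pyGet? nxt 1 with
          | none => simp [pvStepA, h0, g1, h1, hh2, h3]
          | some b1 =>
            cases h4 : PySem.List.pyGet? x 1 with
            | none => simp [pvStepA, h0, g1, h1, hh2, h3, h4]
            | some a1 =>
              simp only [pvStepA, h0, g1, h1, hh2, h3, h4]
              rw [pvSetShift c a [""] (s : Int) (by omega),
                  pvSetShift _ a ["MOV", b1, a1] ((s : Int) + 1) (by omega)]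
              simp
        · cases h2 : PySem.List.pyGet? nxt 0 with
          | none => simp [pvStepA, h0, g1, h1, h2]
          | some hh =>
            have hne : hh ≠ pop := fun he => h2c ⟨hh, h2, he⟩
            simp [pvStepA, h0, g1, h1, h2, hne]
    · simp [pvStepA, h0, hp]

theorem pvFold_shift (psh pop : String) (L : List (List String)) :
    ∀ (s : Nat) (a : List String) (c : List (List String)) (b0 : Bool),
      (PySem.List.enumerate L ((s : Int) + 1)).foldl (pvStepA psh pop) (a :: c, b0) =
        ((fun r => (a :: r.1, r.2))
          ((PySem.List.enumerate L ((s : Int))).foldl (pvStepA psh pop) (c, b0)) :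
          List (List String) × Bool) := by
  induction L with
  | nil => intro s a c b0; simp [PySem.List.enumerate_nil]
  | cons x L ih =>
    intro s a c b0
    rw [PySem.List.enumerate_cons, PySem.List.enumerate_cons, List.foldl_cons, List.foldl_cons]
    rw [pvStepA_shift]
    rcases hr : pvStepA psh pop (c, b0) ((s : Int), x) with ⟨c', b'⟩
    have := ih (s + 1) a c' b'
    push_cast at this ⊢
    rw [this]

theorem pvStepA_zero (psh pop : String) (a b : List String) (rest : List (List String)) (s : Bool) :
    pvStepA psh pop (a :: b :: rest, s) ((0 : Int), a) =
      (if pvM psh pop a b then ([""] :: ["MOV", b.getD 1 "", a.getD 1 ""] :: rest, true)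
       else (a :: b :: rest, s)) := by
  have g1 : PySem.List.pyGet? (a :: b :: rest) ((0 : Int) + 1) = some b := by
    rw [pvGetShift _ _ (0 : Int) (by omega), PySem.List.pyGet?_zero_cons]
  cases h0 : PySem.List.pyGet? a 0 with
  | none => simp [pvStepA, pvM, h0]
  | some h =>
    by_cases hp : h = psh
    · subst hp
      cases h2 : PySem.List.pyGet? b 0 with
      | none => simp [pvStepA, pvM, h0, g1, h2]
      | some h2v =>
        by_cases hpop : h2v = pop
        · subst hpop
          cases h3 : PySem.List.pyGet? b 1 with
          | none => simp [pvStepA, pvM, h0, g1, h2, h3]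
          | some b1 =>
            cases h4 : PySem.List.pyGet? a 1 with
            | none => simp [pvStepA, pvM, h0, g1, h2, h3, h4]
            | some a1 =>
              have hb1 : b.getD 1 "" = b1 := by
                rw [PySem.List.pyGet?_of_nonneg _ (by omega)] at h3
                simp at h3
                simp [List.getD_eq_getElem?_getD, h3]
              have ha1 : a.getD 1 "" = a1 := by
                rw [PySem.List.pyGet?_of_nonneg _ (by omega)] at h4
                simp at h4
                simp [List.getD_eq_getElem?_getD, h4]
              simp only [pvStepA, pvM, h0, g1, h2, h3, h4, hb1, ha1]
              rw [PySem.List.pySetD_of_nonneg _ _ (by omega : (0 : Int) ≤ 0)]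
              simp only [Int.toNat_zero, List.set_cons_zero]
              rw [pvSetShift _ _ ["MOV", b1, a1] (0 : Int) (by omega)]
              rw [PySem.List.pySetD_of_nonneg _ _ (by omega : (0 : Int) ≤ 0)]
              simp
        · simp [pvStepA, pvM, h0, g1, h2, hpop]
    · simp [pvStepA, pvM, h0, hp]

theorem pvM_heads (psh pop : String) (a b : List String) (hm : pvM psh pop a b = true) :
    PySem.List.pyGet? a 0 = some psh ∧ PySem.List.pyGet? b 0 = some pop := by
  cases h0 : PySem.List.pyGet? a 0 with
  | none => simp [pvM, h0] at hm
  | some h =>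
    by_cases hp : h = psh
    · subst hp
      cases h2 : PySem.List.pyGet? b 0 with
      | none => simp [pvM, h0, h2] at hm
      | some h2v =>
        by_cases hq : h2v = pop
        · exact ⟨rfl, by rw [hq]⟩
        · simp [pvM, h0, h2, hq] at hm
    · simp [pvM, h0, hp] at hm

theorem pvStepA_nomatch (psh pop : String) (st : List (List String) × Bool) (p : Int × List String)
    (h : String) (h0 : PySem.List.pyGet? p.2 0 = some h) (hne : h ≠ psh) :
    pvStepA psh pop st p = st := by
  simp [pvStepA, h0, hne]

theorem pvLoopA_eq_pvT (psh pop : String) (hne : psh ≠ pop) :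
    ∀ (code : List (List String)) (s : Bool),
      pvLoopA psh pop code s = ((pvT psh pop code).1, s || (pvT psh pop code).2) := by
  intro code
  induction code using pvT.induct (psh := psh) (pop := pop) with
  | case1 a b rest hm ih =>
    intro s
    unfold pvLoopA
    rw [PySem.List.slice_to_neg_one, show (a :: b :: rest).dropLast = a :: (b :: rest).dropLast from by
      cases rest <;> simp [List.dropLast]]
    rw [PySem.List.enumerate_cons, List.foldl_cons, pvStepA_zero, if_pos hm]
    cases rest with
    | nil =>
      simp [PySem.List.enumerate_nil, pvT, hm, List.dropLast]
    | cons r rest' =>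
      rw [show (b :: r :: rest').dropLast = b :: (r :: rest').dropLast from by simp [List.dropLast]]
      rw [show ((0 : Int) + 1) = (((0 : Nat)) : Int) + 1 from by norm_num]
      rw [pvFold_shift]
      rw [PySem.List.enumerate_cons, List.foldl_cons,
        pvStepA_nomatch psh pop _ ((((0 : Nat)) : Int), b) pop (pvM_heads psh pop a b hm).2
          (fun he => hne he.symm)]
      rw [pvFold_shift]
      have hloop : (PySem.List.enumerate ((r :: rest').dropLast) ((((0 : Nat)) : Int))).foldl
          (pvStepA psh pop) (r :: rest', true) = pvLoopA psh pop (r :: rest') true := by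
        unfold pvLoopA
        rw [PySem.List.slice_to_neg_one]
        norm_num
      rw [hloop, ih true]
      simp [pvT, hm]
  | case2 a b rest hm ih =>
    intro s
    unfold pvLoopA
    rw [PySem.List.slice_to_neg_one, show (a :: b :: rest).dropLast = a :: (b :: rest).dropLast from by
      cases rest <;> simp [List.dropLast]]
    rw [PySem.List.enumerate_cons, List.foldl_cons, pvStepA_zero, if_neg (by simp [hm])]
    rw [show ((0 : Int) + 1) = (((0 : Nat)) : Int) + 1 from by norm_num]
    rw [pvFold_shift]
    have hloop : (PySem.List.enumerate ((b :: rest).dropLast) ((((0 : Nat)) : Int))).foldl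
        (pvStepA psh pop) (b :: rest, s) = pvLoopA psh pop (b :: rest) s := by
      unfold pvLoopA
      rw [PySem.List.slice_to_neg_one]
      norm_num
    rw [hloop, ih s]
    simp [pvT, hm]
  | case3 l hl =>
    intro s
    cases l with
    | nil => simp [pvLoopA, PySem.List.slice_to_neg_one, PySem.List.enumerate_nil, pvT]
    | cons a t =>
      cases t with
      | nil => simp [pvLoopA, PySem.List.slice_to_neg_one, PySem.List.enumerate_nil, pvT,
          List.dropLast]
      | cons b r => exact (hl a b r rfl).elim

theorem pvM_hd1_false (psh pop hx : String) (a b : List String)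
    (h : PySem.List.pyGet? a 0 = some hx) (hne : hx ≠ psh) : pvM psh pop a b = false := by
  simp [pvM, h, hne]

theorem pvM_hd2_false (psh pop hy : String) (a b : List String)
    (h : PySem.List.pyGet? b 0 = some hy) (hne : hy ≠ pop) : pvM psh pop a b = false := by
  unfold pvM
  cases h0 : PySem.List.pyGet? a 0 with
  | none => rfl
  | some hx =>
    by_cases hp : hx = psh
    · simp [hp, h, hne]
    · simp [hp]

theorem pvT_skip' (psh pop : String) (a : List String) (w : List (List String))
    (h : ∀ y t, w = y :: t → pvM psh pop a y = false) :
    pvT psh pop (a :: w) = (a :: (pvT psh pop w).1, (pvT psh pop w).2) := by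
  cases w with
  | nil => simp [pvT]
  | cons y t => simp [pvT, h y t rfl]

theorem pvT_head (psh pop : String) (x : List String) (l : List (List String)) :
    ∃ t, (pvT psh pop (x :: l)).1 = x :: t ∨ (pvT psh pop (x :: l)).1 = [""] :: t := by
  cases l with
  | nil => exact ⟨[], Or.inl rfl⟩
  | cons y t =>
    by_cases hm : pvM psh pop x y = true
    · exact ⟨["MOV", y.getD 1 "", x.getD 1 ""] :: (pvT psh pop t).1, Or.inr (by simp [pvT, hm])⟩
    · exact ⟨(pvT psh pop (y :: t)).1, Or.inl (by simp [pvT, hm])⟩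

theorem pvHdEmpty : PySem.List.pyGet? ([""] : List String) 0 = some "" :=
  PySem.List.pyGet?_zero_cons _ _

theorem pvHdMov (u v : String) : PySem.List.pyGet? (["MOV", u, v] : List String) 0 = some "MOV" :=
  PySem.List.pyGet?_zero_cons _ _

theorem pvChain (code : List (List String)) :
    (let r1 := pvT "PSH" "POP" code
     let r2 := pvT "HPSH" "HPOP" r1.1
     let r3 := pvT "HSAV" "HRSR" r2.1
     ((r3.1, r1.2 || r2.2 || r3.2) : List (List String) × Bool)) = pvTC code := by
  induction code using pvTC.induct with
  | case1 a b rest hm ih =>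
    simp only at ih ⊢
    rcases Bool.or_eq_true_iff.mp hm with hm' | hm3
    · rcases Bool.or_eq_true_iff.mp hm' with hm1 | hm2
      · have hha := (pvM_heads _ _ a b hm1).1
        have hT1 : pvT "PSH" "POP" (a :: b :: rest) =
            ([""] :: ["MOV", b.getD 1 "", a.getD 1 ""] :: (pvT "PSH" "POP" rest).1, true) := by
          simp [pvT, hm1]
        rw [hT1]
        rw [pvT_skip' "HPSH" "HPOP" [""] _ (fun y t hyt => by
          exact pvM_hd1_false _ _ _ _ _ pvHdEmpty (by decide))]
        rw [pvT_skip' "HPSH" "HPOP" _ _ (fun y t hyt => by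
          exact pvM_hd1_false _ _ _ _ _ (pvHdMov _ _) (by decide))]
        rw [pvT_skip' "HSAV" "HRSR" [""] _ (fun y t hyt => by
          exact pvM_hd1_false _ _ _ _ _ pvHdEmpty (by decide))]
        rw [pvT_skip' "HSAV" "HRSR" _ _ (fun y t hyt => by
          exact pvM_hd1_false _ _ _ _ _ (pvHdMov _ _) (by decide))]
        simp only [pvTC, hm, if_pos rfl]
        rw [← ih]
        simp
      · have hha := (pvM_heads _ _ a b hm2).1
        have hhb := (pvM_heads _ _ a b hm2).2
        have hT1 : pvT "PSH" "POP" (a :: b :: rest) =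
            (a :: b :: (pvT "PSH" "POP" rest).1, (pvT "PSH" "POP" rest).2) := by
          rw [show pvT "PSH" "POP" (a :: b :: rest) =
              (a :: (pvT "PSH" "POP" (b :: rest)).1, (pvT "PSH" "POP" (b :: rest)).2) from by
            simp [pvT, pvM_hd1_false "PSH" "POP" _ a b hha (by decide)]]
          rw [pvT_skip' "PSH" "POP" b rest (fun y t hyt =>
            pvM_hd1_false _ _ _ _ _ hhb (by decide))]
        rw [hT1]
        rw [show pvT "HPSH" "HPOP" (a :: b :: (pvT "PSH" "POP" rest).1) =
            ([""] :: ["MOV", b.getD 1 "", a.getD 1 ""] ::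
              (pvT "HPSH" "HPOP" (pvT "PSH" "POP" rest).1).1, true) from by
          simp [pvT, hm2]]
        rw [pvT_skip' "HSAV" "HRSR" [""] _ (fun y t hyt =>
          pvM_hd1_false _ _ _ _ _ pvHdEmpty (by decide))]
        rw [pvT_skip' "HSAV" "HRSR" _ _ (fun y t hyt =>
          pvM_hd1_false _ _ _ _ _ (pvHdMov _ _) (by decide))]
        simp only [pvTC, hm, if_pos rfl]
        rw [← ih]
        simp
    · have hha := (pvM_heads _ _ a b hm3).1
      have hhb := (pvM_heads _ _ a b hm3).2
      have hT1 : pvT "PSH" "POP" (a :: b :: rest) =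
          (a :: b :: (pvT "PSH" "POP" rest).1, (pvT "PSH" "POP" rest).2) := by
        rw [show pvT "PSH" "POP" (a :: b :: rest) =
            (a :: (pvT "PSH" "POP" (b :: rest)).1, (pvT "PSH" "POP" (b :: rest)).2) from by
          simp [pvT, pvM_hd1_false "PSH" "POP" _ a b hha (by decide)]]
        rw [pvT_skip' "PSH" "POP" b rest (fun y t hyt =>
          pvM_hd1_false _ _ _ _ _ hhb (by decide))]
      rw [hT1]
      have hT2 : pvT "HPSH" "HPOP" (a :: b :: (pvT "PSH" "POP" rest).1) =
          (a :: b :: (pvT "HPSH" "HPOP" (pvT "PSH" "POP" rest).1).1,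
            (pvT "HPSH" "HPOP" (pvT "PSH" "POP" rest).1).2) := by
        rw [show pvT "HPSH" "HPOP" (a :: b :: (pvT "PSH" "POP" rest).1) =
            (a :: (pvT "HPSH" "HPOP" (b :: (pvT "PSH" "POP" rest).1)).1,
              (pvT "HPSH" "HPOP" (b :: (pvT "PSH" "POP" rest).1)).2) from by
          simp [pvT, pvM_hd1_false "HPSH" "HPOP" _ a b hha (by decide)]]
        rw [pvT_skip' "HPSH" "HPOP" b _ (fun y t hyt =>
          pvM_hd1_false _ _ _ _ _ hhb (by decide))]
      rw [hT2]
      rw [show pvT "HSAV" "HRSR" (a :: b :: (pvT "HPSH" "HPOP" (pvT "PSH" "POP" rest).1).1) =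
          ([""] :: ["MOV", b.getD 1 "", a.getD 1 ""] ::
            (pvT "HSAV" "HRSR" (pvT "HPSH" "HPOP" (pvT "PSH" "POP" rest).1).1).1, true) from by
        simp [pvT, hm3]]
      simp only [pvTC, hm, if_pos rfl]
      rw [← ih]
      simp
  | case2 a b rest hm ih =>
    simp only at ih ⊢
    have hm1 : pvM "PSH" "POP" a b = false := by
      revert hm; cases pvM "PSH" "POP" a b <;> simp
    have hm2 : pvM "HPSH" "HPOP" a b = false := by
      revert hm; cases pvM "HPSH" "HPOP" a b <;> simp
    have hm3 : pvM "HSAV" "HRSR" a b = false := by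
      revert hm; cases pvM "HSAV" "HRSR" a b <;> simp
    have hT1 : pvT "PSH" "POP" (a :: b :: rest) =
        (a :: (pvT "PSH" "POP" (b :: rest)).1, (pvT "PSH" "POP" (b :: rest)).2) := by
      simp [pvT, hm1]
    rw [hT1]
    obtain ⟨t1, ht1⟩ := pvT_head "PSH" "POP" b rest
    have hskip2 : ∀ y t, (pvT "PSH" "POP" (b :: rest)).1 = y :: t →
        pvM "HPSH" "HPOP" a y = false := by
      intro y t hyt
      rcases ht1 with h | h <;> rw [h] at hyt <;> cases hyt
      · exact hm2
      · exact pvM_hd2_false _ _ _ _ _ pvHdEmpty (by decide)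
    rw [pvT_skip' "HPSH" "HPOP" a _ hskip2]
    obtain ⟨t2, ht2⟩ : ∃ t, (pvT "HPSH" "HPOP" (pvT "PSH" "POP" (b :: rest)).1).1 = b :: t ∨
        (pvT "HPSH" "HPOP" (pvT "PSH" "POP" (b :: rest)).1).1 = [""] :: t := by
      rcases ht1 with h | h <;> rw [h]
      · exact pvT_head _ _ b t1
      · obtain ⟨t', ht'⟩ := pvT_head "HPSH" "HPOP" [""] t1
        rcases ht' with h' | h' <;> exact ⟨t', Or.inr h'⟩
    have hskip3 : ∀ y t, (pvT "HPSH" "HPOP" (pvT "PSH" "POP" (b :: rest)).1).1 = y :: t →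
        pvM "HSAV" "HRSR" a y = false := by
      intro y t hyt
      rcases ht2 with h | h <;> rw [h] at hyt <;> cases hyt
      · exact hm3
      · exact pvM_hd2_false _ _ _ _ _ pvHdEmpty (by decide)
    rw [pvT_skip' "HSAV" "HRSR" a _ hskip3]
    simp only [pvTC, hm]
    rw [← ih]
    simp
  | case3 l hl =>
    cases l with
    | nil => simp [pvT, pvTC]
    | cons a t =>
      cases t with
      | nil => simp [pvT, pvTC]
      | cons b r => exact (hl a b r rfl).elim

theorem pvGet_pairs (x : String) :
    PySem.Dict.get? pvPairs x =
      (if x = "PSH" then some "POP" else if x = "HPSH" then some "HPOP"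
       else if x = "HSAV" then some "HRSR" else none) := by
  have hOf : pvPairs =
      PySem.Dict.mk [("PSH", "POP"), ("HPSH", "HPOP"), ("HSAV", "HRSR")] := by decide
  rw [hOf]
  simp only [PySem.Dict.get?_mk_cons]
  by_cases h1 : x = "PSH"
  · simp [h1]
  · by_cases h2 : x = "HPSH"
    · simp [h1, h2, Ne.symm h1]
    · by_cases h3 : x = "HSAV"
      · simp [h1, h2, h3, Ne.symm h1, Ne.symm h2]
      · simp [h1, h2, h3, Ne.symm h1, Ne.symm h2, Ne.symm h3, PySem.Dict.get?]

theorem pvLen2 (l : List String) :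
    (PySem.List.pyGet? l 1).isSome = decide (2 ≤ l.length) := by
  rcases l with _ | ⟨x, _ | ⟨y, t⟩⟩ <;>
    simp [PySem.List.pyGet?_of_nonneg _ (by omega : (0 : Int) ≤ 1)]

theorem pvM_cons (psh pop : String) (x y : String) (t u : List String) :
    pvM psh pop (x :: t) (y :: u) =
      ((x == psh) && (y == pop) && decide (2 ≤ (y :: u).length) && decide (2 ≤ (x :: t).length)) := by
  have hga : PySem.List.pyGet? (x :: t) 0 = some x := PySem.List.pyGet?_zero_cons _ _
  have hgb : PySem.List.pyGet? (y :: u) 0 = some y := PySem.List.pyGet?_zero_cons _ _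
  unfold pvM
  rw [hga, hgb]
  by_cases hx : x = psh
  · by_cases hy : y = pop
    · simp [hx, hy, pvLen2]
    · simp [hx, hy]
  · simp [hx]

theorem pvMatchB_eq (a b : List String) :
    pvMatchB a b = (pvM "PSH" "POP" a b || pvM "HPSH" "HPOP" a b || pvM "HSAV" "HRSR" a b) := by
  cases a with
  | nil =>
    have : PySem.List.pyGet? ([] : List String) 0 = none := by decide
    simp [pvMatchB, pvM, this]
  | cons x t =>
    cases b with
    | nil =>
      have hga : PySem.List.pyGet? (x :: t) 0 = some x := PySem.List.pyGet?_zero_cons _ _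
      have hgb : PySem.List.pyGet? ([] : List String) 0 = none := by decide
      simp [pvMatchB, pvM, hga, hgb]
      split <;> simp
    | cons y u =>
      simp only [pvMatchB, pvGet_pairs, List.isEmpty_cons, Bool.not_false, Bool.true_and,
        List.headD_cons, pvM_cons]
      by_cases h1 : x = "PSH"
      · by_cases hy : y = "POP"
        · simp [h1, hy, Bool.and_comm, Bool.and_assoc, Bool.and_left_comm]
        · simp [h1, hy, show (y == "POP") = false from by simp [hy],
            show ("PSH" == "HPSH") = false from by decide,
            show ("PSH" == "HSAV") = false from by decide]
      · by_cases h2 : x = "HPSH"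
        · by_cases hy : y = "HPOP"
          · simp [h2, hy, show ("HPSH" == "PSH") = false from by decide,
              Bool.and_comm, Bool.and_assoc, Bool.and_left_comm]
          · simp [h1, h2, hy, show ("HPSH" == "PSH") = false from by decide,
              show ("HPSH" == "HSAV") = false from by decide,
              Bool.and_comm, Bool.and_assoc, Bool.and_left_comm]
        · by_cases h3 : x = "HSAV"
          · by_cases hy : y = "HRSR"
            · simp [h3, hy, show ("HSAV" == "PSH") = false from by decide,
                show ("HSAV" == "HPSH") = false from by decide,
                Bool.and_comm, Bool.and_assoc, Bool.and_left_comm]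
            · simp [h1, h2, h3, hy, show ("HSAV" == "PSH") = false from by decide,
                show ("HSAV" == "HPSH") = false from by decide,
                Bool.and_comm, Bool.and_assoc, Bool.and_left_comm]
          · simp [h1, h2, h3, show (x == "PSH") = false from by simp [h1],
              show (x == "HPSH") = false from by simp [h2],
              show (x == "HSAV") = false from by simp [h3]]

theorem pvKeep_empty : pvKeep [""] = false := by decide

theorem pvKeep_mov (u v : String) : pvKeep ["MOV", u, v] = true := by simp [pvKeep]

theorem pvGoB_eq (code : List (List String)) :
    ∀ (acc : List (List String)) (s : Bool),
      pvGoB acc s code = (acc ++ (pvTC code).1.filter pvKeep, s || (pvTC code).2) := by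
  induction code using pvTC.induct with
  | case1 a b rest hm ih =>
    intro acc s
    rw [show pvGoB acc s (a :: b :: rest) =
        pvGoB (acc ++ [["MOV", b.getD 1 "", a.getD 1 ""]]) true rest from by
      simp [pvGoB, pvMatchB_eq, hm]]
    rw [ih]
    simp only [pvTC, hm, if_pos rfl]
    simp [List.filter_cons, pvKeep_empty, pvKeep_mov]
  | case2 a b rest hm ih =>
    intro acc s
    rw [show pvGoB acc s (a :: b :: rest) =
        pvGoB (if pvKeep a then acc ++ [a] else acc) s (b :: rest) from by
      simp [pvGoB, pvMatchB_eq, hm]]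
    rw [ih]
    have hg : (pvM "PSH" "POP" a b || pvM "HPSH" "HPOP" a b || pvM "HSAV" "HRSR" a b) = false := by
      revert hm
      cases (pvM "PSH" "POP" a b || pvM "HPSH" "HPOP" a b || pvM "HSAV" "HRSR" a b) <;> simp
    simp only [pvTC, hg, Bool.false_eq_true, if_false]
    rw [List.filter_cons]
    cases hk : pvKeep a <;> simp
  | case3 l hl =>
    intro acc s
    cases l with
    | nil => simp [pvGoB, pvTC]
    | cons a t =>
      cases t with
      | nil =>
        rw [show pvGoB acc s [a] = (if pvKeep a then acc ++ [a] else acc, s) from rfl]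
        simp only [pvTC]
        rw [List.filter_cons]
        cases hk : pvKeep a <;> simp
      | cons b r => exact (hl a b r rfl).elim

theorem removeEmptyLines_aux (l : List (List String)) :
    ∀ (acc : List (List String)) (s : Bool),
      (l.foldl (fun (st : List (List String) × Bool) line =>
        if line ≠ [] ∧ line ≠ [""] ∧ line ≠ [" "] then (st.1 ++ [line], st.2) else (st.1, true))
        (acc, s)).1 = acc ++ l.filter pvKeep := by
  induction l with
  | nil => intro acc s; simp
  | cons x l ih =>
    intro acc s
    rw [List.foldl_cons, List.filter_cons]
    by_cases hc : x ≠ [] ∧ x ≠ [""] ∧ x ≠ [" "]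
    · rw [if_pos hc]
      have hk : pvKeep x = true := by simp [pvKeep, hc.1, hc.2.1, hc.2.2]
      rw [ih, hk]
      simp
    · rw [if_neg hc]
      have hk : pvKeep x = false := by
        simp only [pvKeep]
        simp only [not_and_or, not_not] at hc
        rcases hc with h | h | h <;> simp [h]
      rw [ih, hk]
      simp

theorem removeEmptyLines_fst (code : List (List String)) :
    (removeEmptyLines code).1 = code.filter pvKeep := by
  rw [removeEmptyLines, removeEmptyLines_aux]
  simp

theorem pvFinal (code : List (List String)) : PSHPOP code = PSHPOP_alt code := by
  have hc := pvChain code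
  simp only at hc
  unfold PSHPOP PSHPOP_alt
  simp only [pvLoopA_eq_pvT "PSH" "POP" (by decide), pvLoopA_eq_pvT "HPSH" "HPOP" (by decide),
    pvLoopA_eq_pvT "HSAV" "HRSR" (by decide), Bool.false_or]
  rw [pvGoB_eq]
  have h1 : (pvT "HSAV" "HRSR" (pvT "HPSH" "HPOP" (pvT "PSH" "POP" code).1).1).1 =
      (pvTC code).1 := by rw [← hc]
  have h2 : ((pvT "PSH" "POP" code).2 || (pvT "HPSH" "HPOP" (pvT "PSH" "POP" code).1).2 ||
      (pvT "HSAV" "HRSR" (pvT "HPSH" "HPOP" (pvT "PSH" "POP" code).1).1).2) =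
      (pvTC code).2 := by rw [← hc]
  rw [removeEmptyLines_fst, h1]
  simp [← h2, Bool.or_assoc]

-- ===== VERDICT (by name: the statement is the Claim_ definition above) =====
theorem PSHPOP_spec : Claim_equal_PSHPOP := by
  intro code _ _
  unfold Spec_PSHPOP
  exact pvFinal code
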